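-- pv_equiv track=rewrite | github.com/MishaVyb/bizarre-poker | core/functools/looptools.py | begins
-- ===== SOURCE A (Python) =====
-- from typing import (
--     Callable,
--     Generator,
--     Generic,
--     Iterable,
--     Iterator,
--     Literal,
--     Reversible,
--     Sequence,
--     TypeVar,
-- )
--
-- _T = TypeVar('_T')
--
-- def begins(
--     __iterable: Iterable[_T],
-- ) -> Generator[tuple[_T, Literal[True]] | tuple[_T, Literal[False]], None, None]:
--     """Pass through all values from the given iterable.
--     Yield `item` and `True` for the first iteration.
--
--     >>> for item, begins in looptools.begins('abc'):
--     ...     f'{item} | {begins}'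
--     'a | True'
--     'b | False'
--     'c | False'
--
--     [ex lastloop]
--     """
--     it: Iterator[_T] = iter(__iterable)
--     try:
--         yield next(it), True
--     except StopIteration:  # iterable is epty
--         return
--     while True:
--         try:
--             yield next(it), False
--         except StopIteration:
--             return  # reach the end
-- ===== SOURCE B (Python) =====
-- def begins(__iterable):
--     """Yield (item, is_first) for each item: a single uniform pass via enumerate."""
--     for i, item in enumerate(__iterable):
--         yield item, i == 0
-- ===== Notes on version B (the rewrite author's own statement) =====
-- stated objective: idiomatic
-- what changed: A primes the first element out of the loop with manual next()/StopIteration handling; B is one uniform enumerate pass computing the is-first flag as i == 0.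
import Mathlib
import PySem

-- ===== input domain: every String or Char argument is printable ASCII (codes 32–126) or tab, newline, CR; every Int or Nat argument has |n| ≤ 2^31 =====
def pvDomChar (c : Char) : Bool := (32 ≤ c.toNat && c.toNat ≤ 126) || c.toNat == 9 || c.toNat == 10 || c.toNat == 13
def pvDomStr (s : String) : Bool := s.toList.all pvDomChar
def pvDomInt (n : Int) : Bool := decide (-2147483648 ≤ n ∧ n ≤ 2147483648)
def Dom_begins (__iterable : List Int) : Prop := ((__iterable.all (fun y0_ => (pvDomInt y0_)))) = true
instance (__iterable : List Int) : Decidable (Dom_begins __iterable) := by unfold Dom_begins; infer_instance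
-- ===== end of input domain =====

-- B replaces A's prime-first-then-loop generator with one uniform enumerate pass (idiomatic).

-- ===== PORT A =====
-- A's trailing while-loop: yield (x, False) for each remaining element.
def beginsRest (it : List Int) : List (Int × Bool) :=
  match it with
  | [] => []            -- next(it) raises StopIteration: return
  | x :: rest => (x, false) :: beginsRest rest

def begins (__iterable : List Int) : List (Int × Bool) :=
  match __iterable with
  | [] => []            -- first next(it) raises StopIteration: return
  | x :: rest => (x, true) :: beginsRest rest

-- ===== PORT B =====
def begins_alt (__iterable : List Int) : List (Int × Bool) :=
  (PySem.List.enumerate __iterable).map (fun p => (p.2, p.1 == 0))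

-- ===== PRECONDITION & SPEC =====
def Spec_begins (__iterable : List Int) (out : List (Int × Bool)) : Prop := out = begins_alt __iterable
instance (__iterable : List Int) (out : List (Int × Bool)) : Decidable (Spec_begins __iterable out) := by unfold Spec_begins; infer_instance

-- ===== CLAIM (what is proved, stated in full; the proofs are below) =====
def Claim_equal_begins : Prop := ∀ (__iterable : List Int), Dom_begins __iterable → Spec_begins __iterable (begins __iterable)

-- ===== LEMMAS AND PROOFS =====
theorem beginsRest_eq_enumerate (n : Int) (hn : 1 ≤ n) (l : List Int) :
    beginsRest l = (PySem.List.enumerate l n).map (fun p => (p.2, p.1 == 0)) := by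
  induction l generalizing n with
  | nil => simp [beginsRest, PySem.List.enumerate_nil]
  | cons x rest ih =>
    rw [PySem.List.enumerate_cons]
    have hn0 : (n == (0:Int)) = false := by simp; omega
    simp only [beginsRest, List.map_cons, hn0, ih (n + 1) (by omega)]

-- ===== VERDICT (by name: the statement is the Claim_ definition above) =====
theorem begins_spec : Claim_equal_begins := by
  intro l _
  unfold Spec_begins begins begins_alt
  cases l with
  | nil => simp [PySem.List.enumerate_nil]
  | cons x rest =>
    rw [PySem.List.enumerate_cons]
    simp [beginsRest_eq_enumerate 1 le_rfl rest]
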